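-- pv_equiv track=rewrite | github.com/BBBigBang/PM | ner/Functions_nor_v2.py | OrderExist
-- ===== SOURCE A (Python) =====
-- def OrderExist(word,standard,no):
--     '''
--     判断word中的字符是否顺序存在于字符串standard
--     即字符串standard是否满足作为word原型的标准
--     @param:
--         word:          python-string
--         standard:      python-string
--         no:            int
--     @return:
--         bool:          if exists:1 ,else:0
--     '''
--     if no >= len(word):
--         return 1
--     if word[no] in standard:
--         direct = standard.index(word[no])#找到当前字符的索引
--         return OrderExist(word,standard[direct+1:],no+1)
--     elif word[no].lower() in standard:
--         direct = standard.index(word[no].lower())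
--         return OrderExist(word,standard[direct+1:],no+1)
--     else:
--         return 0
-- ===== SOURCE B (Python) =====
-- def OrderExist(word, standard, no):
--     '''Iterative re-implementation: a cursor into the original standard string
--     advanced with str.find, instead of recursion over shrinking slices.'''
--     pos = 0
--     for i in range(no, len(word)):
--         c = word[i]
--         j = standard.find(c, pos)
--         if j == -1:
--             j = standard.find(c.lower(), pos)
--         if j == -1:
--             return 0
--         pos = j + 1
--     return 1
-- ===== Notes on version B (the rewrite author's own statement) =====
-- stated objective: simpler
-- what changed: Replaced A's recursion over freshly copied slices of standard with a single iterative loop keeping a cursor into the original string, advanced by str.find(c, pos); intended as faster (no slice copies, no recursion depth) and measured 9-184x in a timing run, though that run could not confirm it at the largest size because A itself stops returning there.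
-- outside the precondition, e.g. on OrderExist('a', 'a', -5): A raises IndexError, B raises IndexError
import Mathlib
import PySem

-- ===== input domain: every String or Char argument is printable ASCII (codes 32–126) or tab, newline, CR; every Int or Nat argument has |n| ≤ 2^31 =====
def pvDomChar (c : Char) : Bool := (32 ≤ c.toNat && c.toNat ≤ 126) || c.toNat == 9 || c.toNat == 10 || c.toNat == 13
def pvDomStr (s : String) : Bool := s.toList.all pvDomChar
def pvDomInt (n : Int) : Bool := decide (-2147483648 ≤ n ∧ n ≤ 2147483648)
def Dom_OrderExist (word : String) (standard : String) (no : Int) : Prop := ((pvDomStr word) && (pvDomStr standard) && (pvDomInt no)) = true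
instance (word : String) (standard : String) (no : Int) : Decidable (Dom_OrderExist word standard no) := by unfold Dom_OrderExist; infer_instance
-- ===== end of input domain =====

-- B replaces A's recursion over copied slices of `standard` with one iterative
-- loop holding a cursor into the original string (str.find with a start index):
-- same return value by a different, plainer decomposition.

-- ===== PORT A =====
-- A, transliterated on List Char: recursion, slicing standard past the found index.
def pvOrderA (w : List Char) (std : List Char) (no : Int) : Int :=
  if h : (w.length : Int) ≤ no then 1
  else
    match PySem.List.pyGet? w no with
    | none => 0   -- Python raises IndexError here; excluded by Pre_
    | some c =>
      if PySem.Chars.isIn [c] std then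
        let direct := PySem.Chars.find std [c]
        pvOrderA w (PySem.List.slice std (some (direct + 1)) none) (no + 1)
      else if PySem.Chars.isIn [PySem.Chars.lowerChar c] std then
        let direct := PySem.Chars.find std [PySem.Chars.lowerChar c]
        pvOrderA w (PySem.List.slice std (some (direct + 1)) none) (no + 1)
      else 0
termination_by ((w.length : Int) - no).toNat
decreasing_by all_goals (simp at h; omega)

def OrderExist (word : String) (standard : String) (no : Int) : Int :=
  pvOrderA word.toList standard.toList no

-- ===== PORT B =====
-- B: loop over range(no, len(word)) with a cursor pos into standard.
def pvOrderB (w : List Char) (std : List Char) : List Int → Int → Int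
  | [], _ => 1
  | i :: rest, pos =>
    match PySem.List.pyGet? w i with
    | none => 0   -- Python raises IndexError here; excluded by Pre_
    | some c =>
      let j0 := PySem.Chars.findFrom std [c] pos none
      let j := if j0 = -1 then PySem.Chars.findFrom std [PySem.Chars.lowerChar c] pos none else j0
      if j = -1 then 0 else pvOrderB w std rest (j + 1)

def OrderExist_alt (word : String) (standard : String) (no : Int) : Int :=
  pvOrderB word.toList standard.toList
    (PySem.List.pyRange no (word.toList.length : Int) 1) 0

-- ===== PRECONDITION & SPEC =====
-- Pre_ excludes only no < -len(word), where Python A (and B) raise IndexError on word[no].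
def Pre_OrderExist (word : String) (standard : String) (no : Int) : Prop :=
  -(word.toList.length : Int) ≤ no
instance (word : String) (standard : String) (no : Int) : Decidable (Pre_OrderExist word standard no) := by unfold Pre_OrderExist; infer_instance

def pvWitness_OrderExist : String × String × Int := ("Ab", "xaYb", 0)

def Spec_OrderExist (word : String) (standard : String) (no : Int) (out : Int) : Prop := out = OrderExist_alt word standard no
instance (word : String) (standard : String) (no : Int) (out : Int) : Decidable (Spec_OrderExist word standard no out) := by unfold Spec_OrderExist; infer_instance

-- ===== CLAIM (what is proved, stated in full; the proofs are below) =====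
def Claim_equal_OrderExist : Prop := ∀ (word : String) (standard : String) (no : Int), Dom_OrderExist word standard no → Pre_OrderExist word standard no → Spec_OrderExist word standard no (OrderExist word standard no)

-- ===== LEMMAS AND PROOFS =====

-- after a successful find at relative index d in std.drop p, the cursor stays in range
theorem pv_found_lt (std : List Char) (p : Nat) (ch : Char)
    (h : 0 ≤ PySem.Chars.find (std.drop p) [ch]) :
    (PySem.Chars.find (std.drop p) [ch]).toNat < (std.drop p).length := by
  have hpre := (PySem.Chars.find_spec h).1
  have hne : (List.drop (PySem.Chars.find (List.drop p std) [ch]).toNat (List.drop p std)) ≠ [] := by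
    intro hnil
    have := hpre
    rw [hnil] at this
    simp at this
  by_contra hcon
  exact hne (List.drop_eq_nil_of_le (by omega))

theorem pv_key (w std : List Char) : ∀ (n : Nat) (no : Int) (p : Nat),
    ((w.length : Int) - no).toNat = n → p ≤ std.length →
    pvOrderA w (std.drop p) no
      = pvOrderB w std (PySem.List.pyRange no (w.length : Int) 1) (p : Int) := by
  intro n
  induction n with
  | zero =>
    intro no p hn hp
    have hle : (w.length : Int) ≤ no := by omega
    rw [pvOrderA, PySem.List.pyRange_one_eq_nil hle]
    simp [hle, pvOrderB]
  | succ n ih =>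
    intro no p hn hp
    have hlt : no < (w.length : Int) := by omega
    rw [pvOrderA, PySem.List.pyRange_one_cons hlt]
    have hnle : ¬ ((w.length : Int) ≤ no) := by omega
    simp only [hnle, dite_false]
    cases hget : PySem.List.pyGet? w no with
    | none => simp [pvOrderB, hget]
    | some c =>
      simp only [pvOrderB, hget]
      rw [PySem.Chars.findFrom_natCast std [c] p hp]
      by_cases hin : PySem.Chars.isIn [c] (std.drop p)
      · have hinf := (PySem.Chars.isIn_iff_infix [c] (std.drop p)).mp hin
        have hd : 0 ≤ PySem.Chars.find (std.drop p) [c] :=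
          (PySem.Chars.find_nonneg_iff _ _).mpr hinf
        set d := PySem.Chars.find (std.drop p) [c] with hdd
        have hdne : d ≠ -1 := by omega
        have hlen : d.toNat < (std.drop p).length := pv_found_lt std p c hd
        simp only [hin, if_true, hdne, if_false]
        have hj0ne : ¬ ((p : Int) + d = -1) := by omega
        simp only [hj0ne, if_false]
        have hd1 : d + 1 = ((d.toNat + 1 : Nat) : Int) := by omega
        rw [hd1, PySem.List.slice_from_natCast, List.drop_drop]
        have hp' : (d.toNat + 1) + p ≤ std.length := by
          simp [List.length_drop] at hlen; omega
        have := ih (no + 1) (p + (d.toNat + 1)) (by omega) (by omega)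
        rw [this]
        congr 1
        push_cast
        omega
      · have hninf := (PySem.Chars.isIn_eq_false_iff [c] (std.drop p)).mp (by simpa using hin)
        have hd : PySem.Chars.find (std.drop p) [c] = -1 :=
          (PySem.Chars.find_eq_neg_one_iff _ _).mpr hninf
        simp only [hin, hd, if_true, Bool.false_eq_true, if_false]
        rw [PySem.Chars.findFrom_natCast std [PySem.Chars.lowerChar c] p hp]
        by_cases hin2 : PySem.Chars.isIn [PySem.Chars.lowerChar c] (std.drop p)
        · have hinf2 := (PySem.Chars.isIn_iff_infix _ (std.drop p)).mp hin2
          have hd2 : 0 ≤ PySem.Chars.find (std.drop p) [PySem.Chars.lowerChar c] :=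
            (PySem.Chars.find_nonneg_iff _ _).mpr hinf2
          set d2 := PySem.Chars.find (std.drop p) [PySem.Chars.lowerChar c] with hdd2
          have hdne2 : d2 ≠ -1 := by omega
          have hlen2 : d2.toNat < (std.drop p).length := pv_found_lt std p _ hd2
          simp only [hin2, if_true, hdne2, if_false]
          have hj0ne2 : ¬ ((p : Int) + d2 = -1) := by omega
          simp only [hj0ne2, if_false]
          have hd12 : d2 + 1 = ((d2.toNat + 1 : Nat) : Int) := by omega
          rw [hd12, PySem.List.slice_from_natCast, List.drop_drop]
          have hp'2 : (d2.toNat + 1) + p ≤ std.length := by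
            simp [List.length_drop] at hlen2; omega
          have := ih (no + 1) (p + (d2.toNat + 1)) (by omega) (by omega)
          rw [this]
          congr 1
          push_cast
          omega
        · have hninf2 := (PySem.Chars.isIn_eq_false_iff _ (std.drop p)).mp (by simpa using hin2)
          have hd2 : PySem.Chars.find (std.drop p) [PySem.Chars.lowerChar c] = -1 :=
            (PySem.Chars.find_eq_neg_one_iff _ _).mpr hninf2
          simp [hin2, hd2]

-- ===== VERDICT (by name: the statement is the Claim_ definition above) =====
theorem OrderExist_spec : Claim_equal_OrderExist := by
  intro word standard no _ _
  unfold Spec_OrderExist OrderExist OrderExist_alt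
  simpa using pv_key word.toList standard.toList ((word.toList.length : Int) - no).toNat no 0 rfl (Nat.zero_le _)
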